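-- pv_equiv track=rewrite | github.com/rhrlima/cbioge | problems/problem.py | _reshape_mapping
-- ===== SOURCE A (Python) =====
-- def _reshape_mapping(phenotype):
--
--     new_mapping = []
--
--     index = 0
--     while index < len(phenotype):
--         if phenotype[index] == 'conv':
--             end = index+6
--         elif phenotype[index] == 'avgpool':
--             end = index+3
--         else:
--             end = 2
--
--         new_mapping.append(phenotype[index:end])
--         phenotype = phenotype[end:]
--
--     return new_mapping
-- ===== SOURCE B (Python) =====
-- def _reshape_mapping(phenotype):
--     # Single pass with a moving index and a size table: no repeated re-slicing
--     # of the remaining list, so O(n) instead of A's O(n^2).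
--     sizes = {'conv': 6, 'avgpool': 3}
--     out = []
--     i = 0
--     n = len(phenotype)
--     while i < n:
--         size = sizes.get(phenotype[i], 2)
--         out.append(phenotype[i:i + size])
--         i += size
--     return out
-- ===== Notes on version B (the rewrite author's own statement) =====
-- stated objective: faster
-- what changed: A repeatedly re-slices the whole remaining list (phenotype = phenotype[end:]) each iteration; B makes a single pass with a moving index and a chunk-size dict, slicing each chunk out of the original list once.
import Mathlib
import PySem

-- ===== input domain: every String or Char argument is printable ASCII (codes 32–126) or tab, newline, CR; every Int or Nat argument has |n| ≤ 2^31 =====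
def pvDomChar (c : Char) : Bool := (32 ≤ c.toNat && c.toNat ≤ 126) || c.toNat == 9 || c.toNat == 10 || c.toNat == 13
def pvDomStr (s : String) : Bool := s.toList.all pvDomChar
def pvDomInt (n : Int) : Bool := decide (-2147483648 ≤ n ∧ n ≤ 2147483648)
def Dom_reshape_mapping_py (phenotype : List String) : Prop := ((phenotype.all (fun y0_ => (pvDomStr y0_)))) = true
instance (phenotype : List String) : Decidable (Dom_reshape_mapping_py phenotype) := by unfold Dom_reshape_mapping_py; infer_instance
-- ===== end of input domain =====

-- B replaces A's repeated re-slicing of the remaining list by a single pass with a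
-- moving index and a chunk-size table (objective: faster, O(n) instead of O(n^2)).

-- ===== PORT A =====
-- A's while loop: `index` stays 0 (the source never increments it); each iteration
-- rebinds `phenotype` to its tail slice.  Fuel = initial length only makes the
-- recursion total: every iteration drops at least 2 elements, so it never runs out.
def pvAloop : Nat → List String → Int → List (List String) → List (List String)
  | 0, _, _, new_mapping => new_mapping
  | fuel + 1, phenotype, index, new_mapping =>
    if index < (phenotype.length : Int) then
      let e : Int :=
        if PySem.List.pyGetD phenotype index "" = "conv" then index + 6
        else if PySem.List.pyGetD phenotype index "" = "avgpool" then index + 3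
        else 2
      pvAloop fuel (PySem.List.slice phenotype (some e) none) index
        (new_mapping ++ [PySem.List.slice phenotype (some index) (some e)])
    else new_mapping

def reshape_mapping_py (phenotype : List String) : List (List String) :=
  pvAloop phenotype.length phenotype 0 []

-- ===== PORT B =====
def pvSizes : PySem.Dict String Nat := PySem.Dict.mk [("conv", 6), ("avgpool", 3)]

-- termination helper for pvBloop (cited by its decreasing_by)
lemma pvSizes_getD_pos (s : String) : 0 < (PySem.Dict.get? pvSizes s).getD 2 := by
  simp only [pvSizes, PySem.Dict.get?_mk_cons]
  split_ifs <;> simp [PySem.Dict.get?]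

def pvBloop (phenotype : List String) (n : Nat) (i : Nat) (out : List (List String)) :
    List (List String) :=
  if _h : i < n then
    let size : Nat := (PySem.Dict.get? pvSizes (PySem.List.pyGetD phenotype (i : Int) "")).getD 2
    pvBloop phenotype n (i + size)
      (out ++ [PySem.List.slice phenotype (some (i : Int)) (some ((i : Int) + (size : Int)))])
  else out
termination_by n - i
decreasing_by
  have := pvSizes_getD_pos (PySem.List.pyGetD phenotype (i : Int) "")
  omega

def reshape_mapping_py_alt (phenotype : List String) : List (List String) :=
  pvBloop phenotype phenotype.length 0 []

-- ===== PRECONDITION & SPEC =====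
def Spec_reshape_mapping_py (phenotype : List String) (out : List (List String)) : Prop := out = reshape_mapping_py_alt phenotype
instance (phenotype : List String) (out : List (List String)) : Decidable (Spec_reshape_mapping_py phenotype out) := by unfold Spec_reshape_mapping_py; infer_instance

-- ===== CLAIM (what is proved, stated in full; the proofs are below) =====
def Claim_equal_reshape_mapping_py : Prop := ∀ (phenotype : List String), Dom_reshape_mapping_py phenotype → Spec_reshape_mapping_py phenotype (reshape_mapping_py phenotype)

-- ===== LEMMAS AND PROOFS =====

-- common reference: the chunk decomposition both loops compute
def pvChunkSize (x : String) : Nat :=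
  if x = "conv" then 6 else if x = "avgpool" then 3 else 2

lemma pvChunkSize_pos (x : String) : 0 < pvChunkSize x := by
  unfold pvChunkSize; split_ifs <;> omega

def pvChunks : List String → List (List String)
  | [] => []
  | x :: xs =>
    (x :: xs).take (pvChunkSize x) :: pvChunks ((x :: xs).drop (pvChunkSize x))
termination_by l => l.length
decreasing_by
  simp only [List.length_drop]
  have := pvChunkSize_pos x
  simp; omega

lemma pvSizes_getD (s : String) :
    (PySem.Dict.get? pvSizes s).getD 2 = pvChunkSize s := by
  simp only [pvSizes, PySem.Dict.get?_mk_cons, pvChunkSize]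
  by_cases h1 : s = "conv" <;> by_cases h2 : s = "avgpool"
  all_goals simp [h1, h2, PySem.Dict.get?]
  all_goals simp_all [eq_comm]

lemma pvAloop_eq (fuel : Nat) :
    ∀ (s : List String) (acc : List (List String)), s.length ≤ 2 * fuel →
      pvAloop fuel s 0 acc = acc ++ pvChunks s := by
  induction fuel with
  | zero =>
    intro s acc h
    have : s = [] := by cases s with | nil => rfl | cons x xs => simp at h
    subst this; simp [pvAloop, pvChunks]
  | succ n ih =>
    intro s acc h
    cases s with
    | nil => simp [pvAloop, pvChunks]
    | cons x xs =>
      have hlen : (0 : Int) < ((x :: xs).length : Int) := by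
        simp only [List.length_cons]; push_cast; omega
      rw [pvAloop]
      rw [if_pos hlen]
      simp only [PySem.List.pyGetD_zero_cons]
      have hsz : (if x = "conv" then (0 : Int) + 6 else if x = "avgpool" then (0 : Int) + 3 else 2)
          = (pvChunkSize x : Int) := by
        unfold pvChunkSize; split_ifs <;> norm_num
      rw [hsz]
      rw [PySem.List.slice_from _ (by positivity),
          PySem.List.slice_zero_start, PySem.List.slice_to_natCast]
      rw [ih _ _ (by
        have := pvChunkSize_pos x
        simp only [List.length_drop, List.length_cons] at *
        omega)]
      rw [show pvChunks (x :: xs)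
          = (x :: xs).take (pvChunkSize x) :: pvChunks ((x :: xs).drop (pvChunkSize x)) from by
        rw [pvChunks]]
      simp [Int.toNat_natCast]

lemma pvBloop_eq (k : Nat) :
    ∀ (full : List String) (i : Nat) (acc : List (List String)), full.length - i ≤ k →
      pvBloop full full.length i acc = acc ++ pvChunks (full.drop i)
  := by
  induction k with
  | zero =>
    intro full i acc h
    have hge : full.length ≤ i := by omega
    rw [pvBloop]
    simp [Nat.not_lt.mpr hge, List.drop_of_length_le hge, pvChunks]
  | succ k ih =>
    intro full i acc h
    by_cases hi : i < full.length
    · rw [pvBloop]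
      simp only [hi, dif_pos, pvSizes_getD, PySem.List.pyGetD_natCast]
      have hget : full.getD i "" = full[i] := List.getD_eq_getElem full "" hi
      rw [hget, PySem.List.slice_natCast_add]
      rw [ih _ _ _ (by have := pvChunkSize_pos full[i]; omega)]
      rw [show full.drop i = full[i] :: full.drop (i + 1) from List.drop_eq_getElem_cons hi]
      rw [show pvChunks (full[i] :: full.drop (i + 1))
          = (full[i] :: full.drop (i + 1)).take (pvChunkSize full[i])
            :: pvChunks ((full[i] :: full.drop (i + 1)).drop (pvChunkSize full[i])) from by
        rw [pvChunks]]
      rw [← List.drop_eq_getElem_cons hi, List.drop_drop]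
      simp
    · rw [pvBloop]
      simp [hi, List.drop_of_length_le (Nat.not_lt.mp hi), pvChunks]

-- ===== VERDICT (by name: the statement is the Claim_ definition above) =====
theorem reshape_mapping_py_spec : Claim_equal_reshape_mapping_py := by
  intro phenotype _
  unfold Spec_reshape_mapping_py reshape_mapping_py reshape_mapping_py_alt
  rw [pvAloop_eq phenotype.length phenotype [] (by omega),
      pvBloop_eq phenotype.length phenotype 0 [] (by omega)]
  simp
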